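-- pv_equiv track=rewrite | github.com/dev-akshaygupta/getting-started | concepts/Strings/LongestZeroSubstring.py | LongestZeroSubstring
-- ===== SOURCE A (Python) =====
-- def LongestZeroSubstring(string, str_ln, k):
-- 	if k > 1:
-- 		string += string
-- 		str_ln *= 2
--
-- 	count = 0
-- 	max = 0
--
-- 	for s in string:
-- 		if s == "0":
-- 			count += 1
-- 		elif count > 0 and s == "1":
-- 			if count > max:
-- 				max = count
-- 			count = 0
-- 	return max
-- ===== SOURCE B (Python) =====
-- def LongestZeroSubstring(string, str_ln, k):
--     if k > 1:
--         string += string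
--         str_ln *= 2
--     best = 0
--     for seg in string.split("1")[:-1]:
--         c = seg.count("0")
--         if c > best:
--             best = c
--     return best
-- ===== Notes on version B (the rewrite author's own statement) =====
-- stated objective: simpler
-- what changed: Replaces A's stateful per-character scan (count/max registers with a record-on-'1' rule) by split-on-'1' then a max over the '0'-counts of all segments except the last (which drops the trailing run exactly as A does); str.split/str.count do the traversal at C speed, a constant-factor win.
import Mathlib
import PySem

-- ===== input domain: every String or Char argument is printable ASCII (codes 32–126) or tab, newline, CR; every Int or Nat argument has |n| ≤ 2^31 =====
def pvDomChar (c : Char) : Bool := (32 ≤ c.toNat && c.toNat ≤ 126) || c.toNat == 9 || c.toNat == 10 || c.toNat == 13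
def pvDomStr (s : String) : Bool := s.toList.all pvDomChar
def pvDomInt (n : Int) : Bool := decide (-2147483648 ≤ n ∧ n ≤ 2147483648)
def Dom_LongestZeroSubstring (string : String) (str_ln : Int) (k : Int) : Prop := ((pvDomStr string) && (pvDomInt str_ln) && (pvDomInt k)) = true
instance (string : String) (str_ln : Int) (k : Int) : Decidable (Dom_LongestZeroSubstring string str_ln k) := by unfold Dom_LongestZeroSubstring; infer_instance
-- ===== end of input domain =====

-- B replaces A's stateful scan by split-on-'1' + max of '0'-counts over all but the last segment (same behaviour, plainer decomposition).

-- ===== PORT A =====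
def LongestZeroSubstring (string : String) (str_ln : Int) (k : Int) : Int :=
  let cs := string.toList
  let cs := if k > 1 then cs ++ cs else cs
  let _str_ln := if k > 1 then str_ln * 2 else str_ln
  (cs.foldl (fun (p : Int × Int) s =>
      if s == '0' then (p.1 + 1, p.2)
      else if decide (p.1 > 0) && (s == '1') then ((0 : Int), if p.1 > p.2 then p.1 else p.2)
      else p) ((0 : Int), (0 : Int))).2

-- ===== PORT B =====
def LongestZeroSubstring_alt (string : String) (str_ln : Int) (k : Int) : Int :=
  let cs := string.toList
  let cs := if k > 1 then cs ++ cs else cs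
  let segs := PySem.List.slice (PySem.Chars.splitOn cs ['1']) none (some (-1))
  segs.foldl (fun best seg =>
      let c : Int := PySem.Chars.count seg ['0']
      if c > best then c else best) 0

-- ===== PRECONDITION & SPEC =====
def Spec_LongestZeroSubstring (string : String) (str_ln : Int) (k : Int) (out : Int) : Prop := out = LongestZeroSubstring_alt string str_ln k
instance (string : String) (str_ln : Int) (k : Int) (out : Int) : Decidable (Spec_LongestZeroSubstring string str_ln k out) := by unfold Spec_LongestZeroSubstring; infer_instance

-- ===== CLAIM (what is proved, stated in full; the proofs are below) =====
def Claim_equal_LongestZeroSubstring : Prop := ∀ (string : String) (str_ln : Int) (k : Int), Dom_LongestZeroSubstring string str_ln k → Spec_LongestZeroSubstring string str_ln k (LongestZeroSubstring string str_ln k)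

-- ===== LEMMAS AND PROOFS =====

-- Reference split on '1' (proof-side only)
def splitOne : List Char → List (List Char)
  | [] => [[]]
  | c :: rest => if c = '1' then [] :: splitOne rest else (splitOne rest).modifyHead (c :: ·)

theorem splitOne_ne_nil (cs : List Char) : splitOne cs ≠ [] := by
  induction cs with
  | nil => simp [splitOne]
  | cons c rest ih =>
    simp only [splitOne]
    split
    · simp
    · cases h : splitOne rest with
      | nil => exact absurd h ih
      | cons a l => simp [List.modifyHead]

theorem go_eq (fuel : Nat) : ∀ (cs cur : List Char) (acc : List (List Char)),
    cs.length < fuel →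
    PySem.Chars.splitOn.go ['1'] fuel cs cur acc
      = acc.reverse ++ (splitOne cs).modifyHead (cur.reverse ++ ·) := by
  induction fuel with
  | zero => intro cs cur acc h; omega
  | succ f ih =>
    intro cs cur acc h
    cases cs with
    | nil => simp [PySem.Chars.splitOn.go, splitOne]
    | cons c rest =>
      by_cases hc : c = '1'
      · subst hc
        rw [show PySem.Chars.splitOn.go ['1'] (f+1) ('1' :: rest) cur acc
              = PySem.Chars.splitOn.go ['1'] f rest [] (cur.reverse :: acc) by
            simp [PySem.Chars.splitOn.go, List.isPrefixOf]]
        rw [ih rest [] (cur.reverse :: acc) (by simpa using Nat.lt_of_succ_lt_succ h)]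
        cases hs : splitOne rest with
        | nil => exact absurd hs (splitOne_ne_nil rest)
        | cons a l => simp [splitOne, hs, List.modifyHead]
      · rw [show PySem.Chars.splitOn.go ['1'] (f+1) (c :: rest) cur acc
              = PySem.Chars.splitOn.go ['1'] f rest (c :: cur) acc by
            simp [PySem.Chars.splitOn.go, List.isPrefixOf]
            intro h; exact absurd h.symm hc]
        rw [ih rest (c :: cur) acc (by simpa using Nat.lt_of_succ_lt_succ h)]
        cases hs : splitOne rest with
        | nil => exact absurd hs (splitOne_ne_nil rest)
        | cons a l => simp [splitOne, hs, hc, List.modifyHead]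

theorem splitOn_eq (cs : List Char) : PySem.Chars.splitOn cs ['1'] = splitOne cs := by
  unfold PySem.Chars.splitOn
  rw [go_eq (cs.length + 1) cs [] [] (by omega)]
  cases hs : splitOne cs with
  | nil => exact absurd hs (splitOne_ne_nil cs)
  | cons a l => simp [List.modifyHead]

theorem count_go_eq (fuel : Nat) : ∀ (cs : List Char) (acc : Nat),
    cs.length ≤ fuel →
    PySem.Chars.count.go ['0'] fuel cs acc = acc + cs.count '0' := by
  induction fuel with
  | zero =>
    intro cs acc h
    cases cs with
    | nil => simp [PySem.Chars.count.go]
    | cons c rest => simp at h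
  | succ f ih =>
    intro cs acc h
    cases cs with
    | nil => simp [PySem.Chars.count.go]
    | cons c rest =>
      by_cases hc : c = '0'
      · subst hc
        rw [show PySem.Chars.count.go ['0'] (f+1) ('0' :: rest) acc
              = PySem.Chars.count.go ['0'] f rest (acc + 1) by
            simp [PySem.Chars.count.go, List.isPrefixOf]]
        rw [ih rest (acc + 1) (by simpa using Nat.le_of_succ_le_succ h)]
        simp [List.count_cons]
        omega
      · rw [show PySem.Chars.count.go ['0'] (f+1) (c :: rest) acc
              = PySem.Chars.count.go ['0'] f rest acc by
            simp [PySem.Chars.count.go, List.isPrefixOf]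
            intro h; exact absurd h.symm hc]
        rw [ih rest acc (by simpa using Nat.le_of_succ_le_succ h)]
        simp [List.count_cons, hc]

theorem count_eq_count (cs : List Char) : PySem.Chars.count cs ['0'] = cs.count '0' := by
  unfold PySem.Chars.count
  simp [count_go_eq cs.length cs 0 (le_refl _)]

-- abbreviations for the two loop bodies
def stepB (b c : Int) : Int := if c > b then c else b

def count0 (seg : List Char) : Int := (seg.count '0' : Int)

def addFirst (cnt : Int) : List Int → List Int
  | [] => []
  | x :: xs => (cnt + x) :: xs

-- the key invariant: A's scan equals a max-fold over the '0'-counts of all but the last '1'-segment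
theorem main_inv (cs : List Char) : ∀ (cnt mx : Int), 0 ≤ cnt → 0 ≤ mx →
    (cs.foldl (fun (p : Int × Int) s =>
        if s == '0' then (p.1 + 1, p.2)
        else if decide (p.1 > 0) && (s == '1') then ((0 : Int), if p.1 > p.2 then p.1 else p.2)
        else p) (cnt, mx)).2
      = (addFirst cnt ((splitOne cs).map count0)).dropLast.foldl stepB mx := by
  induction cs with
  | nil => intro cnt mx _ _; simp [splitOne, addFirst]
  | cons c rest ih =>
    intro cnt mx hcnt hmx
    by_cases h0 : c = '0'
    · subst h0
      simp only [List.foldl_cons, beq_self_eq_true, ite_true]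
      rw [ih (cnt + 1) mx (by omega) hmx]
      cases hs : splitOne rest with
      | nil => exact absurd hs (splitOne_ne_nil rest)
      | cons a l =>
        simp [splitOne, hs, List.modifyHead, addFirst, count0, List.count_cons]
        ring_nf
    · by_cases h1 : c = '1'
      · subst h1
        have hstate : (if ('1' : Char) == '0' then (cnt + 1, mx)
            else if decide (cnt > 0) && (('1' : Char) == '1') then ((0 : Int), if cnt > mx then cnt else mx)
            else (cnt, mx)) = ((0 : Int), stepB mx cnt) := by
          by_cases hc0 : cnt > 0
          · simp [stepB, hc0]
          · have : cnt = 0 := by omega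
            subst this
            simp [stepB]
            try omega
        simp only [List.foldl_cons, hstate]
        rw [ih 0 (stepB mx cnt) (le_refl 0) (by simp [stepB]; omega)]
        cases hs : splitOne rest with
        | nil => exact absurd hs (splitOne_ne_nil rest)
        | cons a l =>
          simp [splitOne, hs, addFirst]
          cases l with
          | nil => simp [count0]
          | cons b l' => simp [List.dropLast_cons_of_ne_nil, count0]
      · have hstate : (if c == '0' then (cnt + 1, mx)
            else if decide (cnt > 0) && (c == '1') then ((0 : Int), if cnt > mx then cnt else mx)
            else (cnt, mx)) = (cnt, mx) := by
          simp [h0, h1]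
        simp only [List.foldl_cons, hstate]
        rw [ih cnt mx hcnt hmx]
        cases hs : splitOne rest with
        | nil => exact absurd hs (splitOne_ne_nil rest)
        | cons a l =>
          simp [splitOne, hs, h1, List.modifyHead, addFirst, count0, h0]

theorem alt_eq_fold (cs : List Char) :
    (PySem.List.slice (PySem.Chars.splitOn cs ['1']) none (some (-1))).foldl
        (fun best seg => let c : Int := PySem.Chars.count seg ['0']; if c > best then c else best) 0
      = ((splitOne cs).map count0).dropLast.foldl stepB 0 := by
  rw [PySem.List.slice_to_neg_one, splitOn_eq, ← List.map_dropLast, List.foldl_map]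
  have hfun : (fun (best : Int) (seg : List Char) =>
      let c : Int := PySem.Chars.count seg ['0']; if c > best then c else best)
      = fun best seg => stepB best (count0 seg) := by
    funext b seg
    simp [stepB, count0, count_eq_count]
  rw [hfun, ← List.foldl_map]

theorem core_eq (cs : List Char) :
    (cs.foldl (fun (p : Int × Int) s =>
        if s == '0' then (p.1 + 1, p.2)
        else if decide (p.1 > 0) && (s == '1') then ((0 : Int), if p.1 > p.2 then p.1 else p.2)
        else p) ((0 : Int), (0 : Int))).2
      = (PySem.List.slice (PySem.Chars.splitOn cs ['1']) none (some (-1))).foldl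
          (fun best seg => let c : Int := PySem.Chars.count seg ['0']; if c > best then c else best) 0 := by
  rw [alt_eq_fold, main_inv cs 0 0 (le_refl 0) (le_refl 0)]
  cases hs : splitOne cs with
  | nil => exact absurd hs (splitOne_ne_nil cs)
  | cons a l => simp [addFirst]

-- ===== VERDICT (by name: the statement is the Claim_ definition above) =====
theorem LongestZeroSubstring_spec : Claim_equal_LongestZeroSubstring := by
  intro string str_ln k _
  unfold Spec_LongestZeroSubstring LongestZeroSubstring LongestZeroSubstring_alt
  by_cases hk : k > 1 <;> simp only [hk, if_pos] <;>
    exact core_eq _
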